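-- pv_equiv track=rewrite | github.com/ruitianzhong/dpdk-bench | scripts/generate_testing_flow.py | get_ip_list
-- ===== SOURCE A (Python) =====
-- def get_ip_list(flow_size):
--     if flow_size > 40000:
--         raise Exception("Too many flow")
--     src_ip_prefix = "10.1."
--     dst_ip_prefix = "10.2."
--     cnt = 0
--     src_ips = []
--     dst_ips = []
--     while cnt < flow_size:
--         for i in range(2, 202):
--             for j in range(3, 203):
--                 src = src_ip_prefix+str(i)+"."+str(j)
--                 dst = dst_ip_prefix+str(i)+"."+str(j)
--                 src_ips.append(src)
--                 dst_ips.append(dst)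
--                 cnt += 1
--                 if cnt == flow_size:
--                     break
--             if cnt == flow_size:
--                 break
--
--     return (src_ips, dst_ips)
-- ===== SOURCE B (Python) =====
-- def get_ip_list(flow_size):
--     if flow_size > 40000:
--         raise Exception("Too many flow")
--     src_ips = ["10.1." + _suffix(idx) for idx in range(flow_size)]
--     dst_ips = ["10.2." + _suffix(idx) for idx in range(flow_size)]
--     return (src_ips, dst_ips)
--
--
-- def _suffix(idx):
--     return str(2 + idx // 200) + "." + str(3 + idx % 200)
-- ===== Notes on version B (the rewrite author's own statement) =====
-- stated objective: simpler
-- what changed: Replaces the while loop with nested i/j ranges, manual counter and double break by two flat comprehensions over range(flow_size) computing each octet pair in closed form with divmod arithmetic.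
-- outside the precondition, e.g. on get_ip_list(40001): A raises Exception, B raises Exception
import Mathlib
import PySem

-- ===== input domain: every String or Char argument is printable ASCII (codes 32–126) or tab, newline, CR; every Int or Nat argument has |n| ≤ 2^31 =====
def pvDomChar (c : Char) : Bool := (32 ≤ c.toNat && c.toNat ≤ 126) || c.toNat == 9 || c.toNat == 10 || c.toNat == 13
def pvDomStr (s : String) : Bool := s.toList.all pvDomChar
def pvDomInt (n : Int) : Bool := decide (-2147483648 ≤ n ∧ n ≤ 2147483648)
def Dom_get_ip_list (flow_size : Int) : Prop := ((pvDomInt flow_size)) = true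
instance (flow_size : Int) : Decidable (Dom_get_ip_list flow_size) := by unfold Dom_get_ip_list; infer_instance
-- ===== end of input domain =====

-- B replaces A's nested i/j loops with counter and double break by a flat closed-form
-- divmod pass over range(flow_size); equivalence is proved for flow_size ≤ 40000 (A raises above).

-- ===== PORT A =====
-- inner j-loop: appends, increments cnt, breaks when cnt == flow_size
def jloopA (fs i : Int) : List Int → List String → List String → Int → (List String × List String × Int)
  | [], src, dst, cnt => (src, dst, cnt)
  | j :: rest, src, dst, cnt =>
    let src' := src ++ ["10.1." ++ PySem.Int.toStr i ++ "." ++ PySem.Int.toStr j]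
    let dst' := dst ++ ["10.2." ++ PySem.Int.toStr i ++ "." ++ PySem.Int.toStr j]
    let cnt' := cnt + 1
    if cnt' = fs then (src', dst', cnt') else jloopA fs i rest src' dst' cnt'

-- outer i-loop: runs the j-loop, breaks when cnt == flow_size
def iloopA (fs : Int) : List Int → List String → List String → Int → (List String × List String × Int)
  | [], src, dst, cnt => (src, dst, cnt)
  | i :: rest, src, dst, cnt =>
    match jloopA fs i (PySem.List.pyRange 3 203 1) src dst cnt with
    | (s, d, c) => if c = fs then (s, d, c) else iloopA fs rest s d c

-- the while loop, with fuel only to make it total (each iteration raises cnt by ≥ 1)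
def whileA (fs : Int) : Nat → (List String × List String × Int) → (List String × List String × Int)
  | 0, s => s
  | fuel + 1, (src, dst, cnt) =>
    if cnt < fs then whileA fs fuel (iloopA fs (PySem.List.pyRange 2 202 1) src dst cnt)
    else (src, dst, cnt)

def get_ip_list (flow_size : Int) : List String × List String :=
  if flow_size > 40000 then ([], [])   -- Python raises here; excluded by Pre_
  else
    match whileA flow_size (flow_size.toNat + 1) ([], [], 0) with
    | (src, dst, _) => (src, dst)

-- ===== PORT B =====
def suffixB (idx : Int) : String :=
  PySem.Int.toStr (2 + PySem.Int.floordiv idx 200) ++ "." ++ PySem.Int.toStr (3 + PySem.Int.mod idx 200)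

def get_ip_list_alt (flow_size : Int) : List String × List String :=
  if flow_size > 40000 then ([], [])   -- Python raises here; excluded by Pre_
  else
    ((PySem.List.pyRange 0 flow_size 1).map (fun idx => "10.1." ++ suffixB idx),
     (PySem.List.pyRange 0 flow_size 1).map (fun idx => "10.2." ++ suffixB idx))

-- ===== PRECONDITION & SPEC =====
-- Pre_ excludes flow_size > 40000, where the Python A raises Exception("Too many flow").
def Pre_get_ip_list (flow_size : Int) : Prop := flow_size ≤ 40000
instance (flow_size : Int) : Decidable (Pre_get_ip_list flow_size) := by unfold Pre_get_ip_list; infer_instance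
def pvWitness_get_ip_list : Int := 407

def Spec_get_ip_list (flow_size : Int) (out : List String × List String) : Prop := out = get_ip_list_alt flow_size
instance (flow_size : Int) (out : List String × List String) : Decidable (Spec_get_ip_list flow_size out) := by unfold Spec_get_ip_list; infer_instance

-- ===== CLAIM (what is proved, stated in full; the proofs are below) =====
def Claim_equal_get_ip_list : Prop := ∀ (flow_size : Int), Dom_get_ip_list flow_size → Pre_get_ip_list flow_size → Spec_get_ip_list flow_size (get_ip_list flow_size)

-- ===== LEMMAS AND PROOFS =====

def g1 (i j : Int) : String := "10.1." ++ PySem.Int.toStr i ++ "." ++ PySem.Int.toStr j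
def g2 (i j : Int) : String := "10.2." ++ PySem.Int.toStr i ++ "." ++ PySem.Int.toStr j

lemma jloopA_spec (fs i : Int) : ∀ (js : List Int) (src dst : List String) (cnt : Int), cnt < fs →
    jloopA fs i js src dst cnt =
      (src ++ (js.take (min (fs - cnt).toNat js.length)).map (g1 i),
       dst ++ (js.take (min (fs - cnt).toNat js.length)).map (g2 i),
       cnt + (min (fs - cnt).toNat js.length : Nat)) := by
  intro js
  induction js with
  | nil => intro src dst cnt h; simp [jloopA]
  | cons j rest ih =>
    intro src dst cnt h
    by_cases hc : cnt + 1 = fs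
    · have : min (fs - cnt).toNat (rest.length + 1) = 1 := by omega
      simp [jloopA, hc, this, g1, g2]
    · have h1 : cnt + 1 < fs := by omega
      have hk : min (fs - cnt).toNat (rest.length + 1)
          = min (fs - (cnt + 1)).toNat rest.length + 1 := by omega
      simp only [jloopA, if_neg hc, ih _ _ _ h1, List.length_cons, hk,
        List.take_succ_cons, List.map_cons]
      refine Prod.ext ?_ (Prod.ext ?_ ?_) <;> simp [g1, g2]
      ring

lemma iloopA_spec (fs : Int) : ∀ (is : List Int) (src dst : List String) (cnt : Int), cnt < fs →
    iloopA fs is src dst cnt =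
      (src ++ ((is.flatMap (fun i => (PySem.List.pyRange 3 203 1).map (g1 i))).take (min (fs - cnt).toNat (200 * is.length))),
       dst ++ ((is.flatMap (fun i => (PySem.List.pyRange 3 203 1).map (g2 i))).take (min (fs - cnt).toNat (200 * is.length))),
       cnt + (min (fs - cnt).toNat (200 * is.length) : Nat)) := by
  intro is
  induction is with
  | nil => intro src dst cnt h; simp [iloopA]
  | cons i rest ih =>
    intro src dst cnt h
    have hlen : (PySem.List.pyRange 3 203 1).length = 200 := by
      rw [PySem.List.length_pyRange_one]; decide
    have hj := jloopA_spec fs i (PySem.List.pyRange 3 203 1) src dst cnt h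
    rw [hlen] at hj
    simp only [iloopA, hj]
    by_cases hc : cnt + ((min (fs - cnt).toNat 200 : Nat) : Int) = fs
    · -- inner loop reached fs: stop
      have hle : (fs - cnt).toNat ≤ 200 := by omega
      have hmin : min (fs - cnt).toNat 200 = (fs - cnt).toNat := by omega
      have hK : min (fs - cnt).toNat (200 * (rest.length + 1)) = (fs - cnt).toNat := by
        have : 200 ≤ 200 * (rest.length + 1) := by omega
        omega
      simp only [List.length_cons, hK, List.flatMap_cons,
        List.take_append, List.length_map, hlen, hmin]
      have h0 : (fs - cnt).toNat - 200 = 0 := by omega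
      rw [if_pos (by omega : cnt + (((fs - cnt).toNat : Nat) : Int) = fs)]
      simp [h0, List.map_take]
    · -- inner loop consumed all 200, continue
      have hgt : 200 < (fs - cnt).toNat := by omega
      have hmin : min (fs - cnt).toNat 200 = 200 := by omega
      rw [hmin] at hc ⊢
      have h2 : cnt + (200 : Nat) < fs := by omega
      simp only [if_neg hc]
      have htake : List.take 200 (PySem.List.pyRange 3 203 1) = PySem.List.pyRange 3 203 1 :=
        List.take_of_length_le (by omega)
      rw [htake, ih _ _ _ h2]
      have hfull : List.take (min (fs - cnt).toNat (200 * (rest.length + 1)))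
          (List.map (g1 i) (PySem.List.pyRange 3 203 1)) = List.map (g1 i) (PySem.List.pyRange 3 203 1) :=
        List.take_of_length_le (by simp [hlen]; omega)
      have hfull2 : List.take (min (fs - cnt).toNat (200 * (rest.length + 1)))
          (List.map (g2 i) (PySem.List.pyRange 3 203 1)) = List.map (g2 i) (PySem.List.pyRange 3 203 1) :=
        List.take_of_length_le (by simp [hlen]; omega)
      simp only [List.length_cons, List.flatMap_cons, List.take_append, List.length_map, hlen,
        hfull, hfull2]
      have hrest : min (fs - cnt).toNat (200 * (rest.length + 1)) - 200
          = min (fs - (cnt + ((200 : Nat) : Int))).toNat (200 * rest.length) := by omega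
      rw [hrest]
      refine Prod.ext ?_ (Prod.ext ?_ ?_)
      · simp [List.append_assoc]
      · simp [List.append_assoc]
      · simp only []
        push_cast
        omega

lemma flat200 {α : Type} (h : Nat → Nat → α) : ∀ n : Nat,
    (List.range n).flatMap (fun a => (List.range 200).map (h a))
      = (List.range (n * 200)).map (fun k => h (k / 200) (k % 200)) := by
  intro n
  induction n with
  | zero => simp
  | succ n ih =>
    rw [show List.range (n + 1) = List.range n ++ [n] from List.range_succ,
      List.flatMap_append, ih, Nat.succ_mul, List.range_add, List.map_append]
    congr 1
    rw [List.flatMap_cons, List.flatMap_nil, List.append_nil, List.map_map]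
    refine List.map_congr_left ?_
    intro b hb
    have hb' : b < 200 := List.mem_range.mp hb
    have h1 : (n * 200 + b) / 200 = n := by omega
    have h2 : (n * 200 + b) % 200 = b := by omega
    simp [Function.comp, h1, h2]

lemma takeT (fs : Int) (h0 : 0 ≤ fs) (h4 : fs ≤ 40000) (g : Int → Int → String) :
    List.take fs.toNat
        ((PySem.List.pyRange 2 202 1).flatMap (fun i => (PySem.List.pyRange 3 203 1).map (g i)))
      = (PySem.List.pyRange 0 fs 1).map
          (fun idx => g (2 + PySem.Int.floordiv idx 200) (3 + PySem.Int.mod idx 200)) := by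
  have h200 : ((202 : Int) - 2).toNat = 200 := by decide
  have h200' : ((203 : Int) - 3).toNat = 200 := by decide
  have e2 : PySem.List.pyRange 2 202 1 = (List.range 200).map (fun k : Nat => 2 + (k : Int)) := by
    rw [PySem.List.pyRange_one, h200]
  have e3 : PySem.List.pyRange 3 203 1 = (List.range 200).map (fun k : Nat => 3 + (k : Int)) := by
    rw [PySem.List.pyRange_one, h200']
  have e0 : PySem.List.pyRange 0 fs 1 = (List.range fs.toNat).map (fun k : Nat => (k : Int)) := by
    rw [PySem.List.pyRange_one]; simp
  rw [e2, e3, e0, List.flatMap_map]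
  simp only [List.map_map, Function.comp_def]
  rw [flat200 (fun a b => g (2 + (a : Int)) (3 + (b : Int))) 200, ← List.map_take,
    List.take_range]
  have hmin : min fs.toNat (200 * 200) = fs.toNat := by omega
  rw [hmin]
  refine List.map_congr_left ?_
  intro k _
  simp

-- ===== VERDICT (by name: the statement is the Claim_ definition above) =====
theorem get_ip_list_spec : Claim_equal_get_ip_list := by
  intro fs _ hpre
  unfold Pre_get_ip_list at hpre
  unfold Spec_get_ip_list get_ip_list get_ip_list_alt
  rw [if_neg (by omega : ¬ fs > 40000), if_neg (by omega : ¬ fs > 40000)]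
  by_cases hfs : fs ≤ 0
  · have hnil : PySem.List.pyRange 0 fs 1 = [] := PySem.List.pyRange_one_eq_nil hfs
    have ht : fs.toNat = 0 := by omega
    rw [ht, hnil]
    simp [whileA, show ¬ (0 : Int) < fs from by omega]
  · have hpos : 0 < fs := by omega
    obtain ⟨m, hm⟩ : ∃ m, fs.toNat = m + 1 := ⟨fs.toNat - 1, by omega⟩
    have hlen2 : (PySem.List.pyRange 2 202 1).length = 200 := by
      rw [PySem.List.length_pyRange_one]; decide
    have hstep := iloopA_spec fs (PySem.List.pyRange 2 202 1) [] [] 0 hpos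
    rw [hlen2] at hstep
    have hK : min (fs - 0).toNat (200 * 200) = fs.toNat := by omega
    rw [hK] at hstep
    have hcnt : (0 : Int) + (fs.toNat : Int) = fs := by omega
    rw [hcnt] at hstep
    rw [hm]
    simp only [whileA, if_pos hpos, hstep, List.nil_append]
    rw [if_neg (lt_irrefl fs)]
    rw [takeT fs (le_of_lt hpos) hpre g1, takeT fs (le_of_lt hpos) hpre g2]
    refine Prod.ext ?_ ?_ <;>
      · refine List.map_congr_left ?_
        intro idx _
        simp [g1, g2, suffixB, String.append_assoc]
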